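-- pv_equiv track=rewrite | github.com/Nighteyez07/AdventOfCode | 2025/day06.py | parse_worksheet
-- ===== SOURCE A (Python) =====
-- def parse_worksheet(lines):
--     """Parse the worksheet into individual problems."""
--     if not lines:
--         return []
--
--     # Find the maximum width
--     max_width = max(len(line) for line in lines)
--
--     # Pad all lines to the same width
--     padded_lines = [line.ljust(max_width) for line in lines]
--
--     # Identify columns that are problems (not all spaces)
--     problems = []
--     col = 0
--
--     while col < max_width:
--         # Check if this column has any non-space characters
--         has_content = any(line[col] != ' ' for line in padded_lines)
--
--         if has_content:
--             # Find the width of this problem (until we hit an all-space column)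
--             problem_start = col
--             problem_end = col
--
--             # Find where this problem ends
--             while problem_end < max_width:
--                 # Check if column problem_end is all spaces
--                 is_separator = all(line[problem_end] == ' ' for line in padded_lines)
--                 if is_separator:
--                     break
--                 problem_end += 1
--
--             # Extract this problem
--             problem_lines = []
--             for line in padded_lines:
--                 problem_text = line[problem_start:problem_end].strip()
--                 if problem_text:
--                     problem_lines.append(problem_text)
--
--             if problem_lines:
--                 problems.append(problem_lines)
--
--             col = problem_end + 1
--         else:
--             col += 1
--
--     return problems
-- ===== SOURCE B (Python) =====
-- def parse_worksheet(lines):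
--     """Recursive splitter: peel problems off the left edge of the grid."""
--     if not lines:
--         return []
--     w = max(len(line) for line in lines)
--     rows = [line.ljust(w) for line in lines]
--     return _peel(rows, w)
--
--
-- def _peel(rows, w):
--     """rows all have width w; peel the leftmost problem and recurse on the remainder."""
--     if w == 0:
--         return []
--     if all(r[0] == ' ' for r in rows):
--         return _peel([r[1:] for r in rows], w - 1)
--     k = next((c for c in range(w) if all(r[c] == ' ' for r in rows)), w)
--     block = [t for t in (r[:k].strip() for r in rows) if t]
--     rest = _peel([r[k + 1:] for r in rows], max(w - k - 1, 0))
--     return ([block] + rest) if block else rest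
-- ===== Notes on version B (the rewrite author's own statement) =====
-- stated objective: alternative
-- what changed: A iterates column indices over a fixed grid with an outer while-loop and an inner separator-probing while-loop plus an accumulator; B is a recursive peeler that slices the leftmost problem off the row strings and recurses on the physically shortened remainder, building the result front-to-back by cons.
import Mathlib
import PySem

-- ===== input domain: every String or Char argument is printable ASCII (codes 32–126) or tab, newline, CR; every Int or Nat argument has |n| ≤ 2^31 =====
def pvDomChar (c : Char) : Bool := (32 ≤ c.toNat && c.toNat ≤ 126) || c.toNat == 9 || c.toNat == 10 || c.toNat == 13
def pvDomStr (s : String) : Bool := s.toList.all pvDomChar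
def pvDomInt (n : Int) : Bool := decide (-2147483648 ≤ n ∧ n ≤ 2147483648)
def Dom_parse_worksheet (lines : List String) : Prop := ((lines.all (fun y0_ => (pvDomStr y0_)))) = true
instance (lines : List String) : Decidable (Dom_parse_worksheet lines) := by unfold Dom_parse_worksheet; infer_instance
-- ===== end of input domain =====

-- B replaces A's index-based column scan (outer while + inner separator-probing while over a
-- fixed grid) by structural recursion that peels the leftmost problem off and recurses on the
-- physically sliced remainder of each row (objective: alternative decomposition, not faster).

-- ===== PORT A =====
-- line[a:b].strip()  (a ≤ b Nat slice; exact per PySem.List.slice_natCast)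
def pvSliceStrip (l : List Char) (a b : Nat) : List Char :=
  PySem.Chars.strip ((l.drop a).take (b - a))

-- max_width via max() over the non-empty list of lengths (foldl of Nat.max from 0 is that max)
def pvMaxWidth (lines : List String) : Nat :=
  (lines.map (fun s => s.toList.length)).foldl Nat.max 0

-- line.ljust(maxw): pad with spaces (Nat subtraction = Python's max(maxw - len, 0))
def pvPad (lines : List String) (maxw : Nat) : List (List Char) :=
  lines.map (fun s => s.toList ++ List.replicate (maxw - s.toList.length) ' ')

-- the inner 'while problem_end < max_width' loop of A
def pvFindEnd (padded : List (List Char)) (maxw e : Nat) : Nat :=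
  if _h : e < maxw then
    if padded.all (fun l => l.getD e ' ' == ' ') then e
    else pvFindEnd padded maxw (e + 1)
  else e
termination_by maxw - e
decreasing_by exact Nat.sub_succ_lt_self maxw e _h

theorem pvFindEnd_le (padded : List (List Char)) (maxw e : Nat) :
    e ≤ pvFindEnd padded maxw e := by
  rw [pvFindEnd]
  split_ifs with h1 h2
  · exact le_refl e
  · exact Nat.le_of_succ_le (pvFindEnd_le padded maxw (e + 1))
  · exact le_refl e
termination_by maxw - e
decreasing_by exact Nat.sub_succ_lt_self maxw e h1

-- the outer 'while col < max_width' loop of A (index access line[col] is in range, so getD is exact)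
def pvLoopA (padded : List (List Char)) (maxw col : Nat) (probs : List (List String)) :
    List (List String) :=
  if _h : col < maxw then
    if padded.any (fun l => l.getD col ' ' != ' ') then
      let e := pvFindEnd padded maxw col
      let pl := List.foldl
        (fun acc l => if !(pvSliceStrip l col e).isEmpty
                      then acc ++ [String.ofList (pvSliceStrip l col e)] else acc) [] padded
      pvLoopA padded maxw (e + 1) (if !pl.isEmpty then probs ++ [pl] else probs)
    else pvLoopA padded maxw (col + 1) probs
  else probs
termination_by maxw - col
decreasing_by
  · exact Nat.sub_lt_sub_left _h (Nat.lt_succ_of_le (pvFindEnd_le padded maxw col))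
  · exact Nat.sub_succ_lt_self maxw col _h

def parse_worksheet (lines : List String) : List (List String) :=
  if lines.isEmpty then []
  else
    let maxw := pvMaxWidth lines
    pvLoopA (pvPad lines maxw) maxw 0 []

-- ===== PORT B =====
-- k = next((c for c in range(w) if all(r[c]==' ' for r in rows)), w)
def pvFirstBlank (rows : List (List Char)) (w : Nat) : Nat :=
  ((List.range w).find? (fun c => rows.all (fun r => r.getD c ' ' == ' '))).getD w

-- _peel(rows, w): peel the leftmost problem off the grid, recurse on the sliced remainder
def pvPeel (rows : List (List Char)) (w : Nat) : List (List String) :=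
  if w = 0 then []
  else if rows.all (fun r => r.getD 0 ' ' == ' ') then
    pvPeel (rows.map (fun r => r.drop 1)) (w - 1)
  else
    let k := pvFirstBlank rows w
    let block := ((rows.map (fun r => PySem.Chars.strip (r.take k))).filter
      (fun t => !t.isEmpty)).map String.ofList
    let rest := pvPeel (rows.map (fun r => r.drop (k + 1))) (w - (k + 1))
    if !block.isEmpty then block :: rest else rest
termination_by w
decreasing_by
  · exact Nat.sub_lt (Nat.pos_of_ne_zero (by assumption)) Nat.one_pos
  · exact Nat.sub_lt (Nat.pos_of_ne_zero (by assumption)) (Nat.succ_pos _)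

def parse_worksheet_alt (lines : List String) : List (List String) :=
  if lines.isEmpty then []
  else
    let maxw := pvMaxWidth lines
    pvPeel (pvPad lines maxw) maxw

-- ===== PRECONDITION & SPEC =====
def Spec_parse_worksheet (lines : List String) (out : List (List String)) : Prop := out = parse_worksheet_alt lines
instance (lines : List String) (out : List (List String)) : Decidable (Spec_parse_worksheet lines out) := by unfold Spec_parse_worksheet; infer_instance

-- ===== CLAIM (what is proved, stated in full; the proofs are below) =====
def Claim_equal_parse_worksheet : Prop := ∀ (lines : List String), Dom_parse_worksheet lines → Spec_parse_worksheet lines (parse_worksheet lines)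

-- ===== LEMMAS AND PROOFS =====

theorem pvColBlank_shift (padded : List (List Char)) (off c : Nat) :
    ((padded.map (fun r => r.drop off)).all (fun r => r.getD c ' ' == ' '))
      = padded.all (fun l => l.getD (off + c) ' ' == ' ') := by
  rw [List.all_map]
  exact congrArg padded.all (funext fun r => by simp [Function.comp])

theorem pvDropDrop (padded : List (List Char)) (i j : Nat) :
    (padded.map (fun r => r.drop i)).map (fun r => r.drop j)
      = padded.map (fun r => r.drop (i + j)) := by
  rw [List.map_map]
  exact congrArg (fun f => List.map f padded)
    (funext fun r => by simp [Function.comp, List.drop_drop])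

theorem pvFirstBlank_succ (rows : List (List Char)) (w : Nat) :
    pvFirstBlank rows (w + 1) =
      if rows.all (fun r => r.getD 0 ' ' == ' ') then 0
      else pvFirstBlank (rows.map (fun r => r.drop 1)) w + 1 := by
  unfold pvFirstBlank
  rw [List.range_succ_eq_map]
  by_cases h : rows.all (fun r => r.getD 0 ' ' == ' ')
  · rw [List.find?_cons_of_pos (by exact h), if_pos h]
    rfl
  · rw [List.find?_cons_of_neg (by simpa using h), if_neg h, List.find?_map]
    have hp : ((fun c => rows.all (fun r => r.getD c ' ' == ' ')) ∘ Nat.succ)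
        = (fun c => (rows.map (fun r => r.drop 1)).all (fun r => r.getD c ' ' == ' ')) := by
      funext c
      show rows.all (fun r => r.getD (c + 1) ' ' == ' ') = _
      rw [pvColBlank_shift rows 1 c, Nat.add_comm 1 c]
    rw [hp]
    cases hf : (List.range w).find?
        (fun c => (rows.map (fun r => r.drop 1)).all (fun r => r.getD c ' ' == ' ')) <;>
      simp

-- A's end-of-problem scan equals off + B's first-blank index over the dropped rows
theorem pvFindEnd_eq_firstBlank (padded : List (List Char)) (W : Nat) :
    ∀ n off, off ≤ W → n = W - off →
      pvFindEnd padded W off = off + pvFirstBlank (padded.map (fun r => r.drop off)) (W - off) := by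
  intro n
  induction n with
  | zero =>
    intro off hle hn
    have : off = W := by omega
    subst this
    rw [pvFindEnd, dif_neg (by omega)]
    simp [pvFirstBlank]
  | succ n ih =>
    intro off hle hn
    have hlt : off < W := by omega
    have hw : W - off = (W - (off + 1)) + 1 := by omega
    have hsh : ((padded.map (fun r => r.drop off)).all (fun r => r.getD 0 ' ' == ' '))
        = padded.all (fun l => l.getD off ' ' == ' ') := by
      have := pvColBlank_shift padded off 0
      simpa using this
    rw [hw, pvFirstBlank_succ, hsh]
    by_cases hb : padded.all (fun l => l.getD off ' ' == ' ')
    · rw [if_pos hb, pvFindEnd, dif_pos hlt, if_pos hb]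
      omega
    · rw [if_neg hb, pvFindEnd, dif_pos hlt,
        if_neg (by simpa using hb)]
      rw [ih (off + 1) (by omega) (by omega), pvDropDrop]
      omega

theorem pvAny_eq_not_all (padded : List (List Char)) (c : Nat) :
    (padded.any (fun l => l.getD c ' ' != ' '))
      = !(padded.all (fun l => l.getD c ' ' == ' ')) := by
  induction padded with
  | nil => rfl
  | cons h t ih => simp only [List.any_cons, List.all_cons, Bool.not_and, bne] at ih ⊢; rw [ih]

theorem pvExtractA_eq_block (padded : List (List Char)) (a b : Nat) :
    List.foldl
      (fun acc l => if !(pvSliceStrip l a b).isEmpty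
                    then acc ++ [String.ofList (pvSliceStrip l a b)] else acc) [] padded
      = ((padded.map (fun l => pvSliceStrip l a b)).filter (fun t => !t.isEmpty)).map
          String.ofList := by
  rw [PySem.List.foldl_append_if (fun l => !(pvSliceStrip l a b).isEmpty)
       (fun l => String.ofList (pvSliceStrip l a b))]
  simp [List.filter_map, Function.comp_def]

theorem pvPeel_zero (rows : List (List Char)) : pvPeel rows 0 = [] := by
  rw [pvPeel]
  simp

-- main invariant: A's loop from column off equals B's peel over the rows sliced at off
theorem pvMain (padded : List (List Char)) (W : Nat) :
    ∀ n off, off ≤ W → W - off ≤ n → ∀ probs,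
      pvLoopA padded W off probs
        = probs ++ pvPeel (padded.map (fun r => r.drop off)) (W - off) := by
  intro n
  induction n with
  | zero =>
    intro off hle hn probs
    have : off = W := by omega
    subst this
    rw [pvLoopA, dif_neg (by omega), pvPeel]
    simp
  | succ n ih =>
    intro off hle hn probs
    by_cases hlt : off < W
    case neg =>
      have : off = W := by omega
      subst this
      rw [pvLoopA, dif_neg (by omega), pvPeel]
      simp
    have hne : W - off ≠ 0 := by omega
    have hb0 : ((padded.map (fun r => r.drop off)).all (fun r => r.getD 0 ' ' == ' '))
        = padded.all (fun l => l.getD off ' ' == ' ') := by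
      have := pvColBlank_shift padded off 0
      simpa using this
    rw [pvLoopA, dif_pos hlt, pvAny_eq_not_all]
    conv_rhs => rw [pvPeel]
    rw [if_neg hne, hb0]
    by_cases hb : padded.all (fun l => l.getD off ' ' == ' ')
    · -- blank column: A moves to off+1, B drops one char per row
      rw [hb, if_pos rfl, if_neg (by simp), pvDropDrop]
      have hw1 : W - off - 1 = W - (off + 1) := by omega
      rw [hw1, ih (off + 1) (by omega) (by omega) probs]
    · -- content column: A scans to the end e = off + k, B peels a block of width k
      rw [Bool.not_eq_true] at hb
      rw [hb, if_pos (by simp), if_neg (by simp)]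
      simp only []
      have hfe := pvFindEnd_eq_firstBlank padded W (W - off) off hle rfl
      set k := pvFirstBlank (padded.map (fun r => r.drop off)) (W - off) with hk
      have hfk : pvFindEnd padded W off = off + k := by rw [hk]; exact hfe
      have hklew : k ≤ W - off := by
        rw [hk]
        unfold pvFirstBlank
        cases hf : (List.range (W - off)).find?
            (fun c => (padded.map (fun r => r.drop off)).all (fun r => r.getD c ' ' == ' ')) with
        | none => simp
        | some c =>
          have hmem := List.mem_of_find?_eq_some hf
          rw [List.mem_range] at hmem
          simp
          omega
      have hslice : (padded.map (fun r => r.drop off)).map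
            (fun r => PySem.Chars.strip (r.take k))
          = padded.map (fun l => pvSliceStrip l off (pvFindEnd padded W off)) := by
        rw [List.map_map]
        exact congrArg (fun f => List.map f padded) (funext fun r => by
          simp only [Function.comp, pvSliceStrip, hfe]
          congr 2
          omega)
      rw [pvExtractA_eq_block, ← hslice, pvDropDrop]
      have hke : pvFindEnd padded W off + 1 = off + (k + 1) := by omega
      have hw2 : W - off - (k + 1) = W - (off + (k + 1)) := by omega
      rw [hke, hw2]
      by_cases hkw : off + (k + 1) ≤ W
      · by_cases hbe : ((((padded.map (fun r => r.drop off)).map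
              (fun r => PySem.Chars.strip (r.take k))).filter
            (fun t => !t.isEmpty)).map String.ofList).isEmpty
        · rw [hbe]
          simp only [Bool.not_true, Bool.false_eq_true, if_false]
          exact ih (off + (k + 1)) (by omega) (by omega) probs
        · rw [Bool.not_eq_true] at hbe
          rw [hbe]
          simp only [Bool.not_false, if_pos]
          rw [ih (off + (k + 1)) (by omega) (by omega)]
          simp
      · -- the run reaches the right edge: both sides are terminal
        have h0 : W - (off + (k + 1)) = 0 := by omega
        rw [h0, pvLoopA, dif_neg (by omega), pvPeel_zero]
        split_ifs <;> simp

-- ===== VERDICT (by name: the statement is the Claim_ definition above) =====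
theorem parse_worksheet_spec : Claim_equal_parse_worksheet := by
  intro lines _
  unfold Spec_parse_worksheet parse_worksheet parse_worksheet_alt
  by_cases h : lines.isEmpty
  · simp [h]
  · simp only [h, if_false, Bool.false_eq_true]
    have := pvMain (pvPad lines (pvMaxWidth lines)) (pvMaxWidth lines)
      (pvMaxWidth lines) 0 (by omega) (by omega) []
    simpa using this
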